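-- pv_equiv track=rewrite | github.com/physical-100/coding_practice | 삼성 기출/2048.py | merge_right
-- ===== SOURCE A (Python) =====
-- def merge_right(p):
--     merged = []
--     i = len(p) - 1
--
--     while i >= 0:
--         if i > 0 and p[i] == p[i - 1]:
--             merged.append(p[i] * 2)
--             i -= 2
--         else:
--             merged.append(p[i])
--             i -= 1
--
--     merged.reverse()
--     return merged
-- ===== SOURCE B (Python) =====
-- def merge_right(p):
--     # group-then-emit: split p into maximal runs of equal consecutive values,
--     # then for each run of value v and length L emit L % 2 leftover copies of v
--     # followed by L // 2 merged tiles v * 2 (a right-ward 2048 merge leaves the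
--     # single unmerged tile on the left of the doubled ones)
--     runs = []
--     i = 0
--     while i < len(p):
--         j = i + 1
--         while j < len(p) and p[j] == p[i]:
--             j += 1
--         runs.append((p[i], j - i))
--         i = j
--     out = []
--     for v, L in runs:
--         out += [v] * (L % 2) + [v * 2] * (L // 2)
--     return out
-- ===== Notes on version B (the rewrite author's own statement) =====
-- stated objective: alternative
-- what changed: Replaces A's right-to-left index-stepping while-loop (append then final reverse) with a two-stage pass: split the row into maximal runs of equal values, then emit L%2 leftovers followed by L//2 doubled tiles per run.
import Mathlib
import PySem

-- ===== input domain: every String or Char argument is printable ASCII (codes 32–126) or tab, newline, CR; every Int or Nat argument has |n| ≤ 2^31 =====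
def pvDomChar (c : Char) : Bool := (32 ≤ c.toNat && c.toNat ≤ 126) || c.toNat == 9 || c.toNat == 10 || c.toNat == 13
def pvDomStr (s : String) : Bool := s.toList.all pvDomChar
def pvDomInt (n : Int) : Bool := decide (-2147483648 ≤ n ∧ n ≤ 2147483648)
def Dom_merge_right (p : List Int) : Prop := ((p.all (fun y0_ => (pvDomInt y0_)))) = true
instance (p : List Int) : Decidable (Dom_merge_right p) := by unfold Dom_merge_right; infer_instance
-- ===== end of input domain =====

-- B replaces A's right-to-left index-stepping scan by a two-stage pass (split into
-- maximal runs of equal values, then emit L%2 leftovers followed by L/2 doubled tiles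
-- per run); objective: alternative decomposition, same O(n) cost.

-- ===== PORT A =====
-- the while loop of A, indexed by fuel = i + 1 (loop runs while i >= 0);
-- p[i] is ported as p.getD i 0 — every access has 0 <= i < len(p), so it is exact
def mergeAuxA (p : List Int) : Nat → List Int → List Int
  | 0, acc => acc
  | j + 1, acc =>
    if 0 < j ∧ p.getD j 0 = p.getD (j - 1) 0 then
      mergeAuxA p (j - 1) (acc ++ [p.getD j 0 * 2])
    else
      mergeAuxA p j (acc ++ [p.getD j 0])

def merge_right (p : List Int) : List Int :=
  (mergeAuxA p p.length []).reverse

-- ===== PORT B =====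
-- Source B's runs(): the counting while-loop 'while i < len(xs) and xs[i] == v' is ported
-- as the length of the equal-prefix (takeWhile), which is exactly that count
def runsB : List Int → List (Int × Nat)
  | [] => []
  | x :: xs =>
    let k := (xs.takeWhile (fun y => y == x)).length
    (x, k + 1) :: runsB (xs.drop k)
  termination_by l => l.length
  decreasing_by simp

def merge_right_alt (p : List Int) : List Int :=
  (runsB p).foldl
    (fun acc vL => acc ++ (List.replicate (vL.2 % 2) vL.1 ++ List.replicate (vL.2 / 2) (vL.1 * 2)))
    []

-- ===== PRECONDITION & SPEC =====
def Spec_merge_right (p : List Int) (out : List Int) : Prop := out = merge_right_alt p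
instance (p : List Int) (out : List Int) : Decidable (Spec_merge_right p out) := by unfold Spec_merge_right; infer_instance

-- ===== CLAIM (what is proved, stated in full; the proofs are below) =====
def Claim_equal_merge_right : Prop := ∀ (p : List Int), Dom_merge_right p → Spec_merge_right p (merge_right p)

-- ===== LEMMAS AND PROOFS =====

-- A's loop, reformulated structurally on the reversed input (output in A's pre-reverse order)
def arev : List Int → List Int
  | [] => []
  | [x] => [x]
  | x :: y :: t => if x = y then x * 2 :: arev t else x :: arev (y :: t)

theorem take_succ_reverse (p : List Int) (j : Nat) (h : j < p.length) :
    (p.take (j + 1)).reverse = p.getD j 0 :: (p.take j).reverse := by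
  have h1 : p.take (j + 1) = p.take j ++ [p.getD j 0] := by
    rw [List.take_add_one, List.getElem?_eq_getElem h, List.getD_eq_getElem p 0 h]
    rfl
  rw [h1, List.reverse_append]
  rfl

theorem mergeAuxA_eq_arev (p : List Int) :
    ∀ n fuel, fuel ≤ n → fuel ≤ p.length → ∀ acc,
      mergeAuxA p fuel acc = acc ++ arev ((p.take fuel).reverse) := by
  intro n
  induction n with
  | zero =>
    intro fuel hn _ acc
    interval_cases fuel
    simp [mergeAuxA, arev]
  | succ n ihn =>
    intro fuel hn h acc
    match fuel with
    | 0 => simp [mergeAuxA, arev]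
    | 1 =>
      have h0 : 0 < p.length := by omega
      rw [mergeAuxA, if_neg (by omega), mergeAuxA, take_succ_reverse p 0 h0]
      simp [arev]
    | (m + 2) =>
      have h1 : m + 1 < p.length := by omega
      have h0 : m < p.length := by omega
      rw [mergeAuxA]
      simp only [Nat.add_sub_cancel]
      rw [take_succ_reverse p (m + 1) h1, take_succ_reverse p m h0, arev]
      by_cases heq : p.getD (m + 1) 0 = p.getD m 0
      · rw [if_pos ⟨by omega, heq⟩, if_pos heq, ihn m (by omega) (by omega)]
        simp [List.append_assoc]
      · rw [if_neg (by intro hc; exact heq hc.2), if_neg heq,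
          ihn (m + 1) (by omega) (by omega), take_succ_reverse p m h0]
        simp [List.append_assoc]

theorem arev_replicate (v : Int) :
    ∀ n L, L ≤ n → arev (List.replicate L v) = List.replicate (L / 2) (v * 2) ++ List.replicate (L % 2) v := by
  intro n
  induction n with
  | zero =>
    intro L hL
    interval_cases L
    simp [arev]
  | succ n ihn =>
    intro L hL
    match L with
    | 0 => simp [arev]
    | 1 => simp [arev]
    | (m + 2) =>
      have : List.replicate (m + 2) v = v :: v :: List.replicate m v := by
        simp [List.replicate_succ]
      rw [this, arev, if_pos rfl, ihn m (by omega)]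
      have h1 : (m + 2) / 2 = m / 2 + 1 := by omega
      have h2 : (m + 2) % 2 = m % 2 := by omega
      rw [h1, h2, List.replicate_succ]
      simp

theorem getLast?_cons_of_ne_nil (a : Int) (l : List Int) (h : l ≠ []) :
    (a :: l).getLast? = l.getLast? := by
  match l with
  | [] => exact absurd rfl h
  | b :: t => simp [List.getLast?_cons_cons]

theorem arev_split (v : Int) :
    ∀ n, ∀ r : List Int, r.length ≤ n → (∀ z, r.getLast? = some z → z ≠ v) → ∀ L,
      arev (r ++ List.replicate L v) = arev r ++ arev (List.replicate L v) := by
  intro n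
  induction n with
  | zero =>
    intro r hr _ L
    have : r = [] := List.eq_nil_of_length_eq_zero (by omega)
    simp [this, arev]
  | succ n ihn =>
    intro r hr hlast L
    match r with
    | [] => simp [arev]
    | [x] =>
      have hx : x ≠ v := hlast x (by simp)
      match L with
      | 0 => simp [arev]
      | (m + 1) =>
        rw [List.replicate_succ]
        show arev (x :: v :: List.replicate m v) = arev [x] ++ arev (v :: List.replicate m v)
        simp only [arev]
        rw [if_neg hx]
        rfl
    | x :: y :: t =>
      have hstep : ∀ z, (y :: t).getLast? = some z → z ≠ v := by
        intro z hz
        exact hlast z (by rw [getLast?_cons_of_ne_nil x (y :: t) (by simp)]; exact hz)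
      by_cases heq : x = y
      · show arev (x :: y :: (t ++ List.replicate L v)) = arev (x :: y :: t) ++ _
        simp only [arev]
        rw [if_pos heq, if_pos heq]
        match t with
        | [] => simp [arev]
        | c :: t' =>
          have ht : ∀ z, (c :: t').getLast? = some z → z ≠ v := by
            intro z hz
            exact hstep z (by rw [getLast?_cons_of_ne_nil y (c :: t') (by simp)]; exact hz)
          rw [ihn (c :: t') (by simp at hr ⊢; omega) ht L]
          simp
      · show arev (x :: y :: (t ++ List.replicate L v)) = arev (x :: y :: t) ++ _
        simp only [arev]
        rw [if_neg heq, if_neg heq]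
        have := ihn (y :: t) (by simp at hr ⊢; omega) hstep L
        rw [show (y :: t) ++ List.replicate L v = y :: (t ++ List.replicate L v) from rfl] at this
        rw [this]
        simp

theorem drop_takeWhile_length (q : Int → Bool) :
    ∀ l : List Int, l.drop (l.takeWhile q).length = l.dropWhile q := by
  intro l
  induction l with
  | nil => simp
  | cons a t ihl =>
    by_cases hq : q a
    · simp [hq, ihl]
    · simp [hq]

theorem head?_dropWhile (q : Int → Bool) :
    ∀ l : List Int, ∀ z, (l.dropWhile q).head? = some z → q z = false := by
  intro l
  induction l with
  | nil => simp
  | cons a t ihl =>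
    intro z hz
    by_cases hq : q a
    · exact ihl z (by simpa [List.dropWhile_cons, hq] using hz)
    · rw [List.dropWhile_cons, if_neg (by simp [hq])] at hz
      simp at hz
      subst hz
      simpa using hq

theorem takeWhile_eq_replicate (x : Int) (xs : List Int) :
    xs.takeWhile (fun y => y == x) = List.replicate (xs.takeWhile (fun y => y == x)).length x := by
  rw [List.eq_replicate_iff]
  refine ⟨rfl, ?_⟩
  intro b hb
  have := List.mem_takeWhile_imp hb
  simpa using this

theorem arev_reverse_eq_alt :
    ∀ n, ∀ p : List Int, p.length ≤ n → (arev p.reverse).reverse = merge_right_alt p := by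
  intro n
  induction n with
  | zero =>
    intro p hp
    have : p = [] := List.eq_nil_of_length_eq_zero (by omega)
    simp [this, merge_right_alt, runsB, arev]
  | succ n ihn =>
    intro p hp
    match p with
    | [] => simp [merge_right_alt, runsB, arev]
    | x :: xs =>
      have hk := takeWhile_eq_replicate x xs
      set k := (xs.takeWhile (fun y => y == x)).length with hkdef
      set rest := xs.drop k with hrest
      have hxs : xs = List.replicate k x ++ rest := by
        conv_lhs => rw [← List.takeWhile_append_dropWhile (p := fun y => y == x) (l := xs)]
        rw [← hk, hrest, hkdef, drop_takeWhile_length]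
      have hp2 : x :: xs = List.replicate (k + 1) x ++ rest := by
        rw [List.replicate_succ]
        conv_lhs => rw [hxs]
        rfl
      have hrev : (x :: xs).reverse = rest.reverse ++ List.replicate (k + 1) x := by
        rw [hp2, List.reverse_append, List.reverse_replicate]
      have hlast : ∀ z, rest.reverse.getLast? = some z → z ≠ x := by
        intro z hz
        have hh : rest.head? = some z := by simpa [List.getLast?_reverse] using hz
        have hz2 : ((fun y => y == x) z) = false := by
          apply head?_dropWhile (fun y => y == x) xs
          rw [← drop_takeWhile_length (fun y => y == x) xs, ← hkdef, ← hrest]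
          exact hh
        simpa using hz2
      have hrestlen : rest.length ≤ n := by
        rw [hrest]
        simp at hp ⊢
        omega
      have hruns : runsB (x :: xs) = (x, k + 1) :: runsB rest := by
        rw [runsB]
      have halt : ∀ q : List Int, merge_right_alt q =
          (runsB q).flatMap (fun vL => List.replicate (vL.2 % 2) vL.1 ++ List.replicate (vL.2 / 2) (vL.1 * 2)) := by
        intro q
        rw [merge_right_alt, PySem.List.foldl_append_eq_flatMap]
        simp
      rw [hrev, arev_split x rest.reverse.length rest.reverse le_rfl hlast (k + 1),
        arev_replicate x (k + 1) (k + 1) le_rfl]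
      rw [List.reverse_append, List.reverse_append, List.reverse_replicate, List.reverse_replicate]
      rw [ihn rest hrestlen]
      rw [halt (x :: xs), hruns, List.flatMap_cons, ← halt rest]

-- ===== VERDICT (by name: the statement is the Claim_ definition above) =====
theorem merge_right_spec : Claim_equal_merge_right := by
  intro p _
  unfold Spec_merge_right merge_right
  rw [mergeAuxA_eq_arev p p.length p.length le_rfl le_rfl [], List.take_length]
  simpa using arev_reverse_eq_alt p.length p le_rfl
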